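-- pv_equiv track=rewrite | github.com/JwahoonKim/PS | 프로그래머스/타겟넘버.py | dfs
-- ===== SOURCE A (Python) =====
-- def dfs(i, nowArr, numbers):
--     if i == len(numbers):
--         return nowArr
--     curNumber = numbers[i]
--     nextArr = []
--     for num in nowArr:
--         nextArr.append(num + curNumber)
--         nextArr.append(num - curNumber)
--     return dfs(i + 1, nextArr, numbers)
-- ===== SOURCE B (Python) =====
-- def dfs(i, nowArr, numbers):
--     cur = nowArr
--     for j in range(i, len(numbers)):
--         n = numbers[j]
--         cur = [x for num in cur for x in (num + n, num - n)]
--     return cur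
-- ===== Notes on version B (the rewrite author's own statement) =====
-- stated objective: idiomatic
-- what changed: The tail recursion over the index is rewritten as an explicit loop over range(i, len(numbers)), rebuilding the current list with a flat comprehension at each step instead of recursing with an append loop.
import Mathlib
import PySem

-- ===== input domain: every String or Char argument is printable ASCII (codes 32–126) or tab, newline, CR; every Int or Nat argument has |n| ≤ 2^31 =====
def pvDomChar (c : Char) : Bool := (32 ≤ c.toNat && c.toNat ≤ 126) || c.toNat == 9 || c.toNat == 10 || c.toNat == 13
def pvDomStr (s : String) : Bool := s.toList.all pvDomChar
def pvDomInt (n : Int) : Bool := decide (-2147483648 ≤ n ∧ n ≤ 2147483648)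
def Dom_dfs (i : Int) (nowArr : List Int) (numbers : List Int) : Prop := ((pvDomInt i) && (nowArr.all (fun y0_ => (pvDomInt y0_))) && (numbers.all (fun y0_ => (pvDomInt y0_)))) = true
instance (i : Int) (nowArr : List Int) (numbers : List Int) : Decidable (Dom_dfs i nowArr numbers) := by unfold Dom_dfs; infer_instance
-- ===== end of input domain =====

-- B rewrites A's tail recursion as an explicit loop over range(i, len(numbers)) with a flat
-- comprehension rebuilding the list each step (objective: idiomatic; same cost).

-- ===== PORT A =====
-- Literal transliteration of A: recursion on i; `numbers[i]` is pyGet? (none = IndexError,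
-- on which the port returns [] — those inputs are excluded by Pre_dfs).
def dfs (i : Int) (nowArr : List Int) (numbers : List Int) : List Int :=
  if i = (numbers.length : Int) then nowArr
  else
    match h : PySem.List.pyGet? numbers i with
    | none => []
    | some curNumber =>
        dfs (i + 1) (nowArr.foldl (fun acc num => acc ++ [num + curNumber, num - curNumber]) []) numbers
termination_by ((numbers.length : Int) + 1 - i).toNat
decreasing_by
  have hin : PySem.Raise.InRange numbers.length i := by
    by_contra hc
    rw [(PySem.List.pyGet?_eq_none_iff numbers i).2 hc] at h
    simp at h
  simp [PySem.Raise.InRange] at hin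
  omega

-- ===== PORT B =====
-- Literal transliteration of B: foldl over range(i, len); the comprehension is flatMap;
-- numbers[j] is pyGetD (always in range under Pre_dfs).
def dfs_alt (i : Int) (nowArr : List Int) (numbers : List Int) : List Int :=
  (PySem.List.pyRange i (numbers.length : Int) 1).foldl
    (fun cur j =>
      let n := PySem.List.pyGetD numbers j 0
      cur.flatMap (fun num => [num + n, num - n]))
    nowArr

-- ===== PRECONDITION & SPEC =====
-- Pre_ excludes exactly the inputs where Python A raises IndexError at numbers[i]
-- (i > len, or i < -len via negative-index wraparound exhausting).
def Pre_dfs (i : Int) (nowArr : List Int) (numbers : List Int) : Prop :=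
  -(numbers.length : Int) ≤ i ∧ i ≤ (numbers.length : Int)
instance (i : Int) (nowArr : List Int) (numbers : List Int) : Decidable (Pre_dfs i nowArr numbers) := by unfold Pre_dfs; infer_instance
def pvWitness_dfs : Int × List Int × List Int := (0, [0], [1, 2])

def Spec_dfs (i : Int) (nowArr : List Int) (numbers : List Int) (out : List Int) : Prop := out = dfs_alt i nowArr numbers
instance (i : Int) (nowArr : List Int) (numbers : List Int) (out : List Int) : Decidable (Spec_dfs i nowArr numbers out) := by unfold Spec_dfs; infer_instance

-- ===== CLAIM (what is proved, stated in full; the proofs are below) =====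
def Claim_equal_dfs : Prop := ∀ (i : Int) (nowArr : List Int) (numbers : List Int), Dom_dfs i nowArr numbers → Pre_dfs i nowArr numbers → Spec_dfs i nowArr numbers (dfs i nowArr numbers)

-- ===== LEMMAS AND PROOFS =====

-- One loop step of B peels off the head of the range.
lemma dfs_alt_step (i : Int) (nowArr numbers : List Int) (h : i < (numbers.length : Int)) :
    dfs_alt i nowArr numbers =
      dfs_alt (i + 1)
        (nowArr.flatMap (fun num =>
          [num + PySem.List.pyGetD numbers i 0, num - PySem.List.pyGetD numbers i 0]))
        numbers := by
  unfold dfs_alt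
  rw [PySem.List.pyRange_one_cons h]
  simp [List.foldl_cons]

-- A = B on Pre_, by induction on the distance len - i.
lemma dfs_eq (k : Nat) : ∀ (i : Int) (nowArr numbers : List Int),
    -(numbers.length : Int) ≤ i → i ≤ (numbers.length : Int) →
    ((numbers.length : Int) - i).toNat = k →
    dfs i nowArr numbers = dfs_alt i nowArr numbers := by
  induction k with
  | zero =>
      intro i nowArr numbers _ h2 hk
      have hi : i = (numbers.length : Int) := by omega
      unfold dfs dfs_alt
      rw [if_pos hi, hi, PySem.List.pyRange_one_eq_nil le_rfl]
      rfl
  | succ k ih =>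
      intro i nowArr numbers h1 h2 hk
      have hlt : i < (numbers.length : Int) := by omega
      have hin : PySem.Raise.InRange numbers.length i := by
        simp [PySem.Raise.InRange]; omega
      obtain ⟨c, hc⟩ : ∃ c, PySem.List.pyGet? numbers i = some c := by
        cases hget : PySem.List.pyGet? numbers i with
        | none => exact absurd hin ((PySem.List.pyGet?_eq_none_iff numbers i).1 hget)
        | some c => exact ⟨c, rfl⟩
      have hD : PySem.List.pyGetD numbers i 0 = c := by
        simp [PySem.List.pyGetD, hc]
      unfold dfs
      rw [if_neg (by omega), hc]
      show dfs (i + 1) (nowArr.foldl (fun acc num => acc ++ [num + c, num - c]) []) numbers = _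
      rw [dfs_alt_step i nowArr numbers hlt, hD]
      rw [PySem.List.foldl_append_eq_flatMap]
      simp only [List.nil_append]
      exact ih (i + 1) _ numbers (by omega) (by omega) (by omega)

-- ===== VERDICT (by name: the statement is the Claim_ definition above) =====
theorem dfs_spec : Claim_equal_dfs := by
  intro i nowArr numbers _ hpre
  unfold Spec_dfs
  exact dfs_eq ((numbers.length : Int) - i).toNat i nowArr numbers hpre.1 hpre.2 rfl
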